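-- pv_equiv track=rewrite | github.com/zainsci/coding-problems | arr-eq-pairs/main.py | divideArray
-- ===== SOURCE A (Python) =====
-- from collections import Counter
--
-- def divideArray(nums):
--     if len(nums) % 2 != 0:
--         return False
--
--     nums = Counter(nums)
--
--     for count in nums.values():
--         if count % 2 != 0:
--             return False
--
--     return True
-- ===== SOURCE B (Python) =====
-- def divideArray(nums):
--     seen = set()
--     for x in nums:
--         if x in seen:
--             seen.discard(x)
--         else:
--             seen.add(x)
--     return not seen
-- ===== Notes on version B (the rewrite author's own statement) =====
-- stated objective: idiomatic
-- what changed: Replaces the Counter build plus count-scan (and the explicit length-parity check) by a single pass that toggles each value's membership in one set; the array is pairable iff the set ends empty.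
import Mathlib
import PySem

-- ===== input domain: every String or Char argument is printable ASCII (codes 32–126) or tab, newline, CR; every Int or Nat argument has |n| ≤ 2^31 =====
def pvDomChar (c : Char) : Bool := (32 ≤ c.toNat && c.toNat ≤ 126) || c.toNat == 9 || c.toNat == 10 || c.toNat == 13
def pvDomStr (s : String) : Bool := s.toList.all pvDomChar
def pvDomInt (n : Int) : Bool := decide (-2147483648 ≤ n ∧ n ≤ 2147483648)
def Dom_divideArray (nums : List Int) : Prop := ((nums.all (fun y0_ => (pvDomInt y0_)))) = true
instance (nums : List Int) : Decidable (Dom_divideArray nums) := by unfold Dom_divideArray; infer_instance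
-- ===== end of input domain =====

-- B replaces Counter-then-scan (plus the explicit length-parity check) by a single-pass set-membership toggle; idiomatic, same cost.

-- ===== PORT A =====
def divideArray (nums : List Int) : Bool :=
  if nums.length % 2 != 0 then false
  else (PySem.Dict.counter nums).values.all (fun c => PySem.Int.mod c 2 == 0)

-- ===== PORT B =====
def divideArray_alt (nums : List Int) : Bool :=
  (nums.foldl
    (fun s x => if PySem.Set.contains s x then PySem.Set.discard s x else PySem.Set.add s x)
    PySem.Set.empty).isEmpty

-- ===== PRECONDITION & SPEC =====
def Spec_divideArray (nums : List Int) (out : Bool) : Prop := out = divideArray_alt nums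
instance (nums : List Int) (out : Bool) : Decidable (Spec_divideArray nums out) := by unfold Spec_divideArray; infer_instance

-- ===== CLAIM (what is proved, stated in full; the proofs are below) =====
def Claim_equal_divideArray : Prop := ∀ (nums : List Int), Dom_divideArray nums → Spec_divideArray nums (divideArray nums)

-- ===== LEMMAS AND PROOFS =====

def pvToggle (s : PySem.Set Int) (x : Int) : PySem.Set Int :=
  if PySem.Set.contains s x then PySem.Set.discard s x else PySem.Set.add s x

lemma pvToggle_nodup (s : PySem.Set Int) (x : Int) (h : s.Nodup) : (pvToggle s x).Nodup := by
  unfold pvToggle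
  split
  · exact PySem.Set.nodup_discard s x h
  · exact PySem.Set.nodup_add s x h

lemma pvFold_mem (xs : List Int) (s : PySem.Set Int) (v : Int) :
    (v ∈ xs.foldl pvToggle s) ↔ ((v ∈ s) ↔ xs.count v % 2 = 0) := by
  induction xs generalizing s with
  | nil => simp
  | cons x xs ih =>
    simp only [List.foldl_cons, ih, List.count_cons]
    unfold pvToggle
    by_cases hvx : x = v
    · subst hvx
      by_cases hm : x ∈ s
      · rw [if_pos ((PySem.Set.contains_iff s x).mpr hm)]
        rw [PySem.Set.mem_discard]
        simp [hm]
        omega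
      · rw [if_neg (by simp [hm])]
        rw [PySem.Set.mem_add]
        simp [hm]
        omega
    · by_cases hm : x ∈ s
      · rw [if_pos ((PySem.Set.contains_iff s x).mpr hm)]
        rw [PySem.Set.mem_discard]
        simp [hvx]
        exact fun _ h => hvx h.symm
      · rw [if_neg (by simp [hm])]
        rw [PySem.Set.mem_add]
        simp [hvx]
        exact fun h => absurd h.symm hvx

lemma pvFold_len_parity (xs : List Int) (s : PySem.Set Int) (h : s.Nodup) :
    (xs.foldl pvToggle s).length % 2 = (s.length + xs.length) % 2 := by
  induction xs generalizing s with
  | nil => simp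
  | cons x xs ih =>
    rw [List.foldl_cons, ih _ (pvToggle_nodup s x h)]
    have hstep : (pvToggle s x).length % 2 = (s.length + 1) % 2 := by
      unfold pvToggle
      by_cases hm : x ∈ s
      · rw [if_pos ((PySem.Set.contains_iff s x).mpr hm)]
        have herase : PySem.Set.discard s x = s.erase x := by
          rw [List.Nodup.erase_eq_filter h]
          simp only [PySem.Set.discard]
          apply List.filter_congr
          intro a _
          simp [bne]
        have hlen := List.length_erase_add_one hm
        rw [herase]
        omega
      · rw [if_neg (by simp [hm])]
        simp [PySem.Set.add, hm]
    simp only [List.length_cons]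
    omega

lemma pvFold_empty_iff (xs : List Int) :
    (xs.foldl pvToggle PySem.Set.empty) = [] ↔ ∀ v : Int, xs.count v % 2 = 0 := by
  constructor
  · intro h v
    have hm := (pvFold_mem xs PySem.Set.empty v)
    rw [h] at hm
    simp [PySem.Set.empty] at hm
    omega
  · intro h
    rw [List.eq_nil_iff_forall_not_mem]
    intro v hv
    rw [pvFold_mem] at hv
    simp [PySem.Set.empty, h v] at hv

-- ===== VERDICT (by name: the statement is the Claim_ definition above) =====
theorem divideArray_spec : Claim_equal_divideArray := by
  intro nums _
  unfold Spec_divideArray divideArray divideArray_alt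
  have hB : (nums.foldl
      (fun s x => if PySem.Set.contains s x then PySem.Set.discard s x else PySem.Set.add s x)
      PySem.Set.empty) = nums.foldl pvToggle PySem.Set.empty := rfl
  rw [hB]
  have hvals : (PySem.Dict.counter nums).values =
      (PySem.Set.ofList nums).map (fun k => ((nums.count k : Int))) := by
    have hi := PySem.Dict.items_counter (xs := nums)
    have hv : (PySem.Dict.counter nums).values = (PySem.Dict.counter nums).items.map (·.2) := rfl
    rw [hv, hi, List.map_map]
    rfl
  by_cases hpar : nums.length % 2 = 0
  · rw [if_neg (by simp [hpar])]
    rw [hvals]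
    rcases Bool.eq_false_or_eq_true ((nums.foldl pvToggle PySem.Set.empty).isEmpty) with hE | hE
    · rw [hE]
      rw [List.isEmpty_iff] at hE
      have hall := (pvFold_empty_iff nums).mp hE
      rw [List.all_eq_true]
      intro c hc
      obtain ⟨k, _, rfl⟩ := List.mem_map.mp hc
      rw [PySem.Int.mod_eq_emod_of_pos (by norm_num)]
      simp only [beq_iff_eq]
      have := hall k
      omega
    · -- B false: some element has odd count, so A's all-scan is false too
      rw [hE]
      rw [List.isEmpty_eq_false_iff_exists_mem] at hE
      obtain ⟨v, hv⟩ := hE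
      rw [pvFold_mem] at hv
      simp [PySem.Set.empty] at hv
      rw [List.all_eq_false]
      refine ⟨(nums.count v : Int), List.mem_map_of_mem ?_, ?_⟩
      · rw [PySem.Set.mem_ofList]
        exact List.count_pos_iff.mp (by omega)
      · rw [PySem.Int.mod_eq_emod_of_pos (by norm_num)]
        simp only [beq_iff_eq]
        omega
  · -- odd length: A is false; B's final set has odd size, hence is nonempty
    rw [if_pos (by simp; omega)]
    rcases Bool.eq_false_or_eq_true ((nums.foldl pvToggle PySem.Set.empty).isEmpty) with hE | hE
    · exfalso
      rw [List.isEmpty_iff] at hE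
      have hp := pvFold_len_parity nums PySem.Set.empty (by simp [PySem.Set.empty])
      rw [hE] at hp
      simp [PySem.Set.empty] at hp
      omega
    · rw [hE]
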